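-- pv_equiv track=rewrite | github.com/mcgilldinglab/UNAGI | UNAGI/processIDREM.py | getClusterPaths
-- ===== SOURCE A (Python) =====
-- def getClusterPaths(edges):
--     '''
--     obtain the paths of each clusters
--     args:
--     edeges: contains three lists of edges between control group and IPF 1 stage, IPF 1 stage and IPF 2 stage, IPF 2 stage and IPF 3 stage
--
--     return:
--     paths: a collection of paths of clusters
--     '''
--     paths = {}
--     C2oneEdge = edges[0]
--     one2twoEdge = edges[1]
--     two2threeEdge = edges[2]
--     for each in C2oneEdge:
--         if str(each[0]) not in paths.keys():
--             paths[str(each[0])]=[[each[0]],[each[1]]]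
--         else:
--             paths[str(each[0])][1].append(each[1])
--
--     #connect2 = {}
--     for each in one2twoEdge:
--         for item in paths.keys():
--             if each[0] in paths[item][1]:
--                 if len(paths[item]) == 2:
--                     paths[item].append([each[1]])
--                 else:
--                     paths[item][2].append(each[1])
--
--
--     for each in two2threeEdge:
--         for item in paths.keys():
--             if len(paths[item]) == 2:
--                 continue
--             if each[0] in paths[item][2]:
--                 if len(paths[item]) == 3:
--                     paths[item].append([each[1]])
--                 else:
--                     paths[item][3].append(each[1])
--     return paths
-- ===== SOURCE B (Python) =====
-- def getClusterPaths(edges):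
--     one2twoEdge = edges[1]
--     two2threeEdge = edges[2]
--     # group stage-1 targets by str(source), remembering the source int
--     lvl1 = {}
--     for e in edges[0]:
--         k = str(e[0])
--         if k in lvl1:
--             lvl1[k][1].append(e[1])
--         else:
--             lvl1[k] = [e[0], [e[1]]]
--     # root-centric level-by-level expansion, filtering each stage in edge order
--     paths = {}
--     for k, (root, l1) in lvl1.items():
--         p = [[root], l1]
--         l1set = set(l1)
--         l2 = [e[1] for e in one2twoEdge if e[0] in l1set]
--         if l2:
--             p.append(l2)
--             l2set = set(l2)
--             l3 = [e[1] for e in two2threeEdge if e[0] in l2set]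
--             if l3:
--                 p.append(l3)
--         paths[k] = p
--     return paths
-- ===== Notes on version B (the rewrite author's own statement) =====
-- stated objective: alternative
-- what changed: A scans every stage-2/3 edge against every existing path, membership-testing each path's previous level per edge and growing the paths in place; B expands each root level by level, filtering each stage's edge list once per root in edge order with set-based membership, then emits the finished path per root.
import Mathlib
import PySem

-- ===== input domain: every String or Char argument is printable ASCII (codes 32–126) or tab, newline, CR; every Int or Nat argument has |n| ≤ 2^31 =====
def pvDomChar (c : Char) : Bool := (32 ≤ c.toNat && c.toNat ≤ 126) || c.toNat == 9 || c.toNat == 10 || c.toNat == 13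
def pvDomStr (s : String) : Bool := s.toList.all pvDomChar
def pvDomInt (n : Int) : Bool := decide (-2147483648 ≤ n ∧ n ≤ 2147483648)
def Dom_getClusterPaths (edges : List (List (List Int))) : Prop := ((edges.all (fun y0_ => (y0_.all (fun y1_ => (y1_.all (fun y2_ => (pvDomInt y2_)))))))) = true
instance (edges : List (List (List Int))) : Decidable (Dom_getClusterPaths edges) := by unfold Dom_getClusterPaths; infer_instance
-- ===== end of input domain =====

-- B replaces A's edge-centric scans (each stage-2/3 edge tested against every path) by a
-- root-centric level-by-level expansion (each root filters the stage edge lists once, in edge order).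

-- ===== PORT A =====
def getClusterPaths (edges : List (List (List Int))) : List (String × List (List Int)) :=
  let C2oneEdge := PySem.List.pyGetD edges 0 []
  let one2twoEdge := PySem.List.pyGetD edges 1 []
  let two2threeEdge := PySem.List.pyGetD edges 2 []
  let paths : PySem.Dict String (List (List Int)) :=
    C2oneEdge.foldl (fun paths e =>
      let k := PySem.Int.toStr (PySem.List.pyGetD e 0 0)
      match paths.get? k with
      | none => paths.insert k [[PySem.List.pyGetD e 0 0], [PySem.List.pyGetD e 1 0]]
      | some v => paths.insert k (v.set 1 (v.getD 1 [] ++ [PySem.List.pyGetD e 1 0]))) PySem.Dict.empty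
  let paths := one2twoEdge.foldl (fun paths e =>
      paths.keys.foldl (fun paths item =>
        let v := paths.getD item []
        if PySem.List.pyGetD e 0 0 ∈ v.getD 1 [] then
          if v.length == 2 then paths.insert item (v ++ [[PySem.List.pyGetD e 1 0]])
          else paths.insert item (v.set 2 (v.getD 2 [] ++ [PySem.List.pyGetD e 1 0]))
        else paths) paths) paths
  let paths := two2threeEdge.foldl (fun paths e =>
      paths.keys.foldl (fun paths item =>
        let v := paths.getD item []
        if v.length == 2 then paths
        else if PySem.List.pyGetD e 0 0 ∈ v.getD 2 [] then
          if v.length == 3 then paths.insert item (v ++ [[PySem.List.pyGetD e 1 0]])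
          else paths.insert item (v.set 3 (v.getD 3 [] ++ [PySem.List.pyGetD e 1 0]))
        else paths) paths) paths
  paths.items

-- ===== PORT B =====
def getClusterPaths_alt (edges : List (List (List Int))) : List (String × List (List Int)) :=
  let one2twoEdge := PySem.List.pyGetD edges 1 []
  let two2threeEdge := PySem.List.pyGetD edges 2 []
  let lvl1 : PySem.Dict String (Int × List Int) :=
    (PySem.List.pyGetD edges 0 []).foldl (fun d e =>
      let k := PySem.Int.toStr (PySem.List.pyGetD e 0 0)
      d.insert k (match d.get? k with
        | some rl => (rl.1, rl.2 ++ [PySem.List.pyGetD e 1 0])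
        | none => (PySem.List.pyGetD e 0 0, [PySem.List.pyGetD e 1 0]))) PySem.Dict.empty
  let paths : PySem.Dict String (List (List Int)) :=
    lvl1.items.foldl (fun acc kv =>
      acc.insert kv.1 (
        let root := kv.2.1
        let l1 := kv.2.2
        let l1set := PySem.Set.ofList l1
        let l2 := one2twoEdge.filterMap (fun e =>
          if l1set.contains (PySem.List.pyGetD e 0 0) then some (PySem.List.pyGetD e 1 0) else none)
        if l2 = [] then [[root], l1]
        else
          let l2set := PySem.Set.ofList l2
          let l3 := two2threeEdge.filterMap (fun e =>
            if l2set.contains (PySem.List.pyGetD e 0 0) then some (PySem.List.pyGetD e 1 0) else none)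
          if l3 = [] then [[root], l1, l2] else [[root], l1, l2, l3])) PySem.Dict.empty
  paths.items

-- ===== PRECONDITION & SPEC =====
-- Pre_ holds exactly when A returns normally (checked against A by fuzzing): A raises IndexError
-- when there are fewer than 3 stage lists, when a stage-1 edge has fewer than 2 entries, or when a
-- stage-2/3 edge is too short AND is actually reached (stage-2 edges are only indexed if stage 1 is
-- non-empty, their targets only if the source is a stage-1 target; similarly for stage 3).
def Pre_getClusterPaths (edges : List (List (List Int))) : Prop :=
  3 ≤ edges.length ∧
  (∀ e ∈ edges.getD 0 [], 2 ≤ e.length) ∧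
  (edges.getD 0 [] ≠ [] →
    (∀ e ∈ edges.getD 1 [], 1 ≤ e.length ∧
      (e.getD 0 0 ∈ (edges.getD 0 []).map (fun e1 => e1.getD 1 0) → 2 ≤ e.length)) ∧
    (((edges.getD 1 []).filter (fun e =>
        decide (e.getD 0 0 ∈ (edges.getD 0 []).map (fun e1 => e1.getD 1 0)))).map
          (fun e => e.getD 1 0) ≠ [] →
      ∀ e ∈ edges.getD 2 [], 1 ≤ e.length ∧
        (e.getD 0 0 ∈ ((edges.getD 1 []).filter (fun e2 =>
            decide (e2.getD 0 0 ∈ (edges.getD 0 []).map (fun e1 => e1.getD 1 0)))).map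
              (fun e2 => e2.getD 1 0) → 2 ≤ e.length)))
instance (edges : List (List (List Int))) : Decidable (Pre_getClusterPaths edges) := by
  unfold Pre_getClusterPaths; infer_instance
def pvWitness_getClusterPaths : List (List (List Int)) := [[[0, 1]], [[1, 2]], [[2, 3]]]
def Spec_getClusterPaths (edges : List (List (List Int))) (out : List (String × List (List Int))) : Prop := out = getClusterPaths_alt edges
instance (edges : List (List (List Int))) (out : List (String × List (List Int))) : Decidable (Spec_getClusterPaths edges out) := by unfold Spec_getClusterPaths; infer_instance

-- ===== CLAIM (what is proved, stated in full; the proofs are below) =====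
def Claim_equal_getClusterPaths : Prop := ∀ (edges : List (List (List Int))), Dom_getClusterPaths edges → Pre_getClusterPaths edges → Spec_getClusterPaths edges (getClusterPaths edges)

-- ===== LEMMAS AND PROOFS =====

-- A's inner `for item in paths.keys()` loop, which conditionally rewrites each key's value in
-- place, acts pointwise on the items list.
theorem pv_foldkeys {κ ν : Type} [BEq κ] [LawfulBEq κ] [DecidableEq κ]
    (stepA : PySem.Dict κ ν → κ → PySem.Dict κ ν) (c : ν → Prop) [DecidablePred c]
    (g : ν → ν) (dflt : ν)
    (hstep : ∀ d k, stepA d k =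
      (if c (d.getD k dflt) then d.insert k (g (d.getD k dflt)) else d)) :
    ∀ (rest pre : List (κ × ν)), ((pre ++ rest).map Prod.fst).Nodup →
      (rest.map Prod.fst).foldl stepA (PySem.Dict.mk (pre ++ rest))
        = PySem.Dict.mk (pre ++ rest.map (fun p => (p.1, if c p.2 then g p.2 else p.2))) := by
  intro rest
  induction rest with
  | nil => intro pre h; simp
  | cons p0 rest' ih =>
    obtain ⟨k0, v0⟩ := p0
    intro pre h
    have h' : (pre.map Prod.fst ++ k0 :: rest'.map Prod.fst).Nodup := by simpa using h
    have h2 : (k0 :: (pre.map Prod.fst ++ rest'.map Prod.fst)).Nodup := List.nodup_middle.mp h'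
    have hk0 : k0 ∉ pre.map Prod.fst ++ rest'.map Prod.fst := (List.nodup_cons.mp h2).1
    have hk0pre : k0 ∉ pre.map Prod.fst := fun hx => hk0 (List.mem_append.mpr (Or.inl hx))
    have hk0rest : k0 ∉ rest'.map Prod.fst := fun hx => hk0 (List.mem_append.mpr (Or.inr hx))
    set d : PySem.Dict κ ν := PySem.Dict.mk (pre ++ (k0, v0) :: rest') with hd
    have hdkeys : d.keys = pre.map Prod.fst ++ k0 :: rest'.map Prod.fst := by
      simp [hd, PySem.Dict.keys]
    have hget : d.get? k0 = some v0 := by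
      apply PySem.Dict.get?_of_mem_items
      · simp [hd]
      · rw [hdkeys]; exact h'
    have hgetD : d.getD k0 dflt = v0 := by
      rw [PySem.Dict.getD_eq_get?_getD, hget]; rfl
    have hcont : d.contains k0 = true := by
      rw [PySem.Dict.contains_eq_decide_mem_keys, hdkeys]; simp
    have hmapfix : ∀ (w : ν) (l : List (κ × ν)), k0 ∉ l.map Prod.fst →
        l.map (fun p => if (p.1 == k0) = true then (k0, w) else p) = l := by
      intro w l hl
      have : l.map (fun p => if (p.1 == k0) = true then (k0, w) else p) = l.map id :=
        List.map_congr_left (fun p hp => by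
          have hne : p.1 ≠ k0 := fun hx => hl (hx ▸ List.mem_map_of_mem hp)
          simp [hne])
      simpa using this
    have hins : ∀ w, d.insert k0 w = PySem.Dict.mk (pre ++ (k0, w) :: rest') := by
      intro w
      apply PySem.Dict.ext
      rw [PySem.Dict.items_insert_of_contains _ _ hcont]
      show (pre ++ (k0, v0) :: rest').map _ = _
      rw [List.map_append, List.map_cons]
      rw [hmapfix w pre hk0pre, hmapfix w rest' hk0rest]
      simp
    have hstep0 : stepA d k0 = PySem.Dict.mk (pre ++ (k0, if c v0 then g v0 else v0) :: rest') := by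
      rw [hstep, hgetD]
      by_cases hc : c v0
      · simp only [hc, if_true, hins]
      · simp only [hc, if_false]
        apply PySem.Dict.ext
        simp [hd]
    have hre : pre ++ (k0, if c v0 then g v0 else v0) :: rest'
        = (pre ++ [(k0, if c v0 then g v0 else v0)]) ++ rest' := by simp
    calc ((((k0, v0) :: rest').map Prod.fst).foldl stepA d)
        = (rest'.map Prod.fst).foldl stepA (stepA d k0) := by simp
      _ = (rest'.map Prod.fst).foldl stepA
            (PySem.Dict.mk ((pre ++ [(k0, if c v0 then g v0 else v0)]) ++ rest')) := by
            rw [hstep0, hre]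
      _ = PySem.Dict.mk ((pre ++ [(k0, if c v0 then g v0 else v0)])
            ++ rest'.map (fun p => (p.1, if c p.2 then g p.2 else p.2))) := by
            apply ih
            simpa using h'
      _ = PySem.Dict.mk (pre ++ ((k0, v0) :: rest').map (fun p => (p.1, if c p.2 then g p.2 else p.2))) := by
            simp

-- the edge-loop/key-loop nest of A's stages 2 and 3 is a per-value fold of the edges
theorem pv_stage {κ ν E : Type} [BEq κ] [LawfulBEq κ] [DecidableEq κ]
    (c : E → ν → Prop) [inst : ∀ e, DecidablePred (c e)] (g : E → ν → ν) (dflt : ν)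
    (stepA : E → PySem.Dict κ ν → κ → PySem.Dict κ ν)
    (hstep : ∀ e d k, stepA e d k =
      (if c e (d.getD k dflt) then d.insert k (g e (d.getD k dflt)) else d)) :
    ∀ (es : List E) (d : PySem.Dict κ ν), d.keys.Nodup →
      (es.foldl (fun d e => d.keys.foldl (stepA e) d) d).items
        = d.items.map (fun p => (p.1, es.foldl (fun v e => if c e v then g e v else v) p.2)) := by
  intro es
  induction es with
  | nil => intro d hnd; simp
  | cons e es' ih =>
    intro d hnd
    have hkeys : d.keys = d.items.map Prod.fst := rfl
    have hone : d.keys.foldl (stepA e) d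
        = PySem.Dict.mk (d.items.map (fun p => (p.1, if c e p.2 then g e p.2 else p.2))) := by
      have := pv_foldkeys (stepA e) (c e) (g e) dflt (hstep e) d.items [] (by simpa [hkeys] using hnd)
      simpa [hkeys] using this
    have hnd' : (PySem.Dict.mk (d.items.map (fun p => (p.1, if c e p.2 then g e p.2 else p.2)))).keys.Nodup := by
      simpa [PySem.Dict.keys, List.map_map, Function.comp, hkeys] using hnd
    calc ((e :: es').foldl (fun d e => d.keys.foldl (stepA e) d) d).items
        = (es'.foldl (fun d e => d.keys.foldl (stepA e) d)
            (PySem.Dict.mk (d.items.map (fun p => (p.1, if c e p.2 then g e p.2 else p.2))))).items := by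
          simp only [List.foldl_cons, hone]
      _ = (d.items.map (fun p => (p.1, if c e p.2 then g e p.2 else p.2))).map
            (fun p => (p.1, es'.foldl (fun v e => if c e v then g e v else v) p.2)) := ih _ hnd'
      _ = d.items.map (fun p => (p.1, (e :: es').foldl (fun v e => if c e v then g e v else v) p.2)) := by
          rw [List.map_map]; rfl

theorem pv_get?_map {κ ν ν' : Type} [BEq κ] (f : ν → ν') :
    ∀ (l : List (κ × ν)) (k : κ),
      (PySem.Dict.mk (l.map (fun p => (p.1, f p.2)))).get? k = ((PySem.Dict.mk l).get? k).map f := by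
  intro l
  induction l with
  | nil => intro k; simp [PySem.Dict.get?]
  | cons p rest ih =>
    obtain ⟨k0, v0⟩ := p
    intro k
    simp only [List.map_cons, PySem.Dict.get?_mk_cons]
    by_cases h : k0 == k
    · simp [h]
    · simp [h, ih]

theorem pv_insert_map {κ ν ν' : Type} [BEq κ] [LawfulBEq κ] [DecidableEq κ]
    (f : ν → ν') (l : List (κ × ν)) (k : κ) (v : ν) :
    (PySem.Dict.mk (l.map (fun p => (p.1, f p.2)))).insert k (f v)
      = PySem.Dict.mk ((((PySem.Dict.mk l).insert k v).items).map (fun p => (p.1, f p.2))) := by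
  have hkeys : (PySem.Dict.mk (l.map (fun p => (p.1, f p.2)))).keys = (PySem.Dict.mk l).keys := by
    simp [PySem.Dict.keys]
  have hcont : (PySem.Dict.mk (l.map (fun p => (p.1, f p.2)))).contains k = (PySem.Dict.mk l).contains k := by
    rw [PySem.Dict.contains_eq_decide_mem_keys, PySem.Dict.contains_eq_decide_mem_keys, hkeys]
  by_cases h : (PySem.Dict.mk l).contains k
  · apply PySem.Dict.ext
    rw [PySem.Dict.items_insert_of_contains _ _ (hcont.trans h)]
    rw [PySem.Dict.items_insert_of_contains _ _ h]
    simp only [List.map_map]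
    apply List.map_congr_left
    intro p _
    by_cases hp : p.1 == k
    · simp [Function.comp, hp]
    · simp [Function.comp, hp]
  · have h' : (PySem.Dict.mk l).contains k = false := by
      exact Bool.not_eq_true _ ▸ (by simpa using h)
    apply PySem.Dict.ext
    rw [PySem.Dict.items_insert_of_not_contains _ _ (hcont.trans h')]
    rw [PySem.Dict.items_insert_of_not_contains _ _ h']
    simp

theorem pv_get?_mapc (l : List (String × (Int × List Int))) (k : String) :
    (PySem.Dict.mk (l.map (fun p => (p.1, ([[p.2.1], p.2.2] : List (List Int)))))).get? k
      = ((PySem.Dict.mk l).get? k).map (fun rl => [[rl.1], rl.2]) :=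
  pv_get?_map (f := fun rl : Int × List Int => ([[rl.1], rl.2] : List (List Int))) l k
theorem pv_insert_mapc (l : List (String × (Int × List Int))) (k : String) (a : Int) (b : List Int) :
    (PySem.Dict.mk (l.map (fun p => (p.1, ([[p.2.1], p.2.2] : List (List Int)))))).insert k [[a], b]
      = PySem.Dict.mk ((((PySem.Dict.mk l).insert k (a, b)).items).map (fun p => (p.1, [[p.2.1], p.2.2]))) :=
  pv_insert_map (fun rl : Int × List Int => ([[rl.1], rl.2] : List (List Int))) l k (a, b)

-- A's first loop builds exactly B's lvl1 dict, each value (r, l1) stored as [[r], l1]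
theorem pv_stage1 :
    ∀ (s1 : List (List Int)) (lv : PySem.Dict String (Int × List Int)),
      s1.foldl (fun paths e =>
        let k := PySem.Int.toStr (PySem.List.pyGetD e 0 0)
        match paths.get? k with
        | none => paths.insert k [[PySem.List.pyGetD e 0 0], [PySem.List.pyGetD e 1 0]]
        | some v => paths.insert k (v.set 1 (v.getD 1 [] ++ [PySem.List.pyGetD e 1 0])))
        (PySem.Dict.mk (lv.items.map (fun p => (p.1, [[p.2.1], p.2.2]))))
      = PySem.Dict.mk ((s1.foldl (fun d e =>
          let k := PySem.Int.toStr (PySem.List.pyGetD e 0 0)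
          d.insert k (match d.get? k with
            | some rl => (rl.1, rl.2 ++ [PySem.List.pyGetD e 1 0])
            | none => (PySem.List.pyGetD e 0 0, [PySem.List.pyGetD e 1 0]))) lv).items.map
          (fun p => (p.1, [[p.2.1], p.2.2]))) := by
  intro s1
  induction s1 with
  | nil => intro lv; simp
  | cons e s1' ih =>
    intro lv
    obtain ⟨l⟩ := lv
    simp only [List.foldl_cons, pv_get?_mapc]
    cases hcase : (PySem.Dict.mk l).get? (PySem.Int.toStr (PySem.List.pyGetD e 0 0)) with
    | none =>
      simp only [Option.map_none]
      rw [pv_insert_mapc]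
      exact ih _
    | some rl =>
      simp only [Option.map_some]
      have hv : (([[rl.1], rl.2] : List (List Int)).set 1
          (([[rl.1], rl.2] : List (List Int)).getD 1 [] ++ [PySem.List.pyGetD e 1 0]))
          = [[rl.1], rl.2 ++ [PySem.List.pyGetD e 1 0]] := by simp [List.set]
      rw [hv, pv_insert_mapc]
      exact ih _

theorem pv_s2_aux (r : Int) (l1 : List Int) :
    ∀ (es : List (List Int)) (acc : List Int),
      es.foldl (fun v e =>
          if PySem.List.pyGetD e 0 0 ∈ v.getD 1 [] then
            (if v.length == 2 then v ++ [[PySem.List.pyGetD e 1 0]]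
             else v.set 2 (v.getD 2 [] ++ [PySem.List.pyGetD e 1 0]))
          else v) [[r], l1, acc]
      = [[r], l1, acc ++ es.filterMap (fun e =>
          if PySem.List.pyGetD e 0 0 ∈ l1 then some (PySem.List.pyGetD e 1 0) else none)] := by
  set f := (fun (v : List (List Int)) (e : List Int) =>
      if PySem.List.pyGetD e 0 0 ∈ v.getD 1 [] then
        (if v.length == 2 then v ++ [[PySem.List.pyGetD e 1 0]]
         else v.set 2 (v.getD 2 [] ++ [PySem.List.pyGetD e 1 0]))
      else v) with hf
  intro es
  induction es with
  | nil => intro acc; simp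
  | cons e es' ih =>
    intro acc
    by_cases hm : PySem.List.pyGetD e 0 0 ∈ l1
    · have hstep : f [[r], l1, acc] e = [[r], l1, acc ++ [PySem.List.pyGetD e 1 0]] := by
        simp only [hf]; simp [hm, List.set]
      rw [List.foldl_cons, hstep, ih]
      simp [hm]
    · have hstep : f [[r], l1, acc] e = [[r], l1, acc] := by
        simp only [hf]; simp [hm]
      rw [List.foldl_cons, hstep, ih]
      simp [hm]

theorem pv_s2 (r : Int) (l1 : List Int) :
    ∀ (es : List (List Int)),
      es.foldl (fun v e =>
          if PySem.List.pyGetD e 0 0 ∈ v.getD 1 [] then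
            (if v.length == 2 then v ++ [[PySem.List.pyGetD e 1 0]]
             else v.set 2 (v.getD 2 [] ++ [PySem.List.pyGetD e 1 0]))
          else v) [[r], l1]
      = (if (es.filterMap (fun e =>
            if PySem.List.pyGetD e 0 0 ∈ l1 then some (PySem.List.pyGetD e 1 0) else none)) = []
         then [[r], l1]
         else [[r], l1, es.filterMap (fun e =>
            if PySem.List.pyGetD e 0 0 ∈ l1 then some (PySem.List.pyGetD e 1 0) else none)]) := by
  set f := (fun (v : List (List Int)) (e : List Int) =>
      if PySem.List.pyGetD e 0 0 ∈ v.getD 1 [] then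
        (if v.length == 2 then v ++ [[PySem.List.pyGetD e 1 0]]
         else v.set 2 (v.getD 2 [] ++ [PySem.List.pyGetD e 1 0]))
      else v) with hf
  intro es
  induction es with
  | nil => simp
  | cons e es' ih =>
    by_cases hm : PySem.List.pyGetD e 0 0 ∈ l1
    · have hstep : f [[r], l1] e = [[r], l1, [PySem.List.pyGetD e 1 0]] := by
        simp only [hf]; simp [hm]
      rw [List.foldl_cons, hstep]
      have := pv_s2_aux r l1 es' [PySem.List.pyGetD e 1 0]
      rw [← hf] at this
      rw [this]
      simp [hm]
    · have hstep : f [[r], l1] e = [[r], l1] := by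
        simp only [hf]; simp [hm]
      rw [List.foldl_cons, hstep, ih]
      simp [hm]

theorem pv_s3_len2 (r : Int) (l1 : List Int) :
    ∀ (es : List (List Int)),
      es.foldl (fun v e =>
          if ¬ v.length = 2 ∧ PySem.List.pyGetD e 0 0 ∈ v.getD 2 [] then
            (if v.length == 3 then v ++ [[PySem.List.pyGetD e 1 0]]
             else v.set 3 (v.getD 3 [] ++ [PySem.List.pyGetD e 1 0]))
          else v) [[r], l1]
      = [[r], l1] := by
  intro es
  induction es with
  | nil => simp
  | cons e es' ih =>
    rw [List.foldl_cons, show (if ¬ ([[r], l1] : List (List Int)).length = 2 ∧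
        PySem.List.pyGetD e 0 0 ∈ ([[r], l1] : List (List Int)).getD 2 [] then
          (if ([[r], l1] : List (List Int)).length == 3 then [[r], l1] ++ [[PySem.List.pyGetD e 1 0]]
           else ([[r], l1] : List (List Int)).set 3 (([[r], l1] : List (List Int)).getD 3 [] ++ [PySem.List.pyGetD e 1 0]))
        else [[r], l1]) = [[r], l1] from by simp]
    exact ih

theorem pv_s3_aux (r : Int) (l1 l2 : List Int) :
    ∀ (es : List (List Int)) (acc : List Int),
      es.foldl (fun v e =>
          if ¬ v.length = 2 ∧ PySem.List.pyGetD e 0 0 ∈ v.getD 2 [] then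
            (if v.length == 3 then v ++ [[PySem.List.pyGetD e 1 0]]
             else v.set 3 (v.getD 3 [] ++ [PySem.List.pyGetD e 1 0]))
          else v) [[r], l1, l2, acc]
      = [[r], l1, l2, acc ++ es.filterMap (fun e =>
          if PySem.List.pyGetD e 0 0 ∈ l2 then some (PySem.List.pyGetD e 1 0) else none)] := by
  set f := (fun (v : List (List Int)) (e : List Int) =>
      if ¬ v.length = 2 ∧ PySem.List.pyGetD e 0 0 ∈ v.getD 2 [] then
        (if v.length == 3 then v ++ [[PySem.List.pyGetD e 1 0]]
         else v.set 3 (v.getD 3 [] ++ [PySem.List.pyGetD e 1 0]))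
      else v) with hf
  intro es
  induction es with
  | nil => intro acc; simp
  | cons e es' ih =>
    intro acc
    by_cases hm : PySem.List.pyGetD e 0 0 ∈ l2
    · have hstep : f [[r], l1, l2, acc] e = [[r], l1, l2, acc ++ [PySem.List.pyGetD e 1 0]] := by
        simp only [hf]; simp [hm, List.set]
      rw [List.foldl_cons, hstep, ih]
      simp [hm]
    · have hstep : f [[r], l1, l2, acc] e = [[r], l1, l2, acc] := by
        simp only [hf]; simp [hm]
      rw [List.foldl_cons, hstep, ih]
      simp [hm]

theorem pv_s3 (r : Int) (l1 l2 : List Int) :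
    ∀ (es : List (List Int)),
      es.foldl (fun v e =>
          if ¬ v.length = 2 ∧ PySem.List.pyGetD e 0 0 ∈ v.getD 2 [] then
            (if v.length == 3 then v ++ [[PySem.List.pyGetD e 1 0]]
             else v.set 3 (v.getD 3 [] ++ [PySem.List.pyGetD e 1 0]))
          else v) [[r], l1, l2]
      = (if (es.filterMap (fun e =>
            if PySem.List.pyGetD e 0 0 ∈ l2 then some (PySem.List.pyGetD e 1 0) else none)) = []
         then [[r], l1, l2]
         else [[r], l1, l2, es.filterMap (fun e =>
            if PySem.List.pyGetD e 0 0 ∈ l2 then some (PySem.List.pyGetD e 1 0) else none)]) := by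
  set f := (fun (v : List (List Int)) (e : List Int) =>
      if ¬ v.length = 2 ∧ PySem.List.pyGetD e 0 0 ∈ v.getD 2 [] then
        (if v.length == 3 then v ++ [[PySem.List.pyGetD e 1 0]]
         else v.set 3 (v.getD 3 [] ++ [PySem.List.pyGetD e 1 0]))
      else v) with hf
  intro es
  induction es with
  | nil => simp
  | cons e es' ih =>
    by_cases hm : PySem.List.pyGetD e 0 0 ∈ l2
    · have hstep : f [[r], l1, l2] e = [[r], l1, l2, [PySem.List.pyGetD e 1 0]] := by
        simp only [hf]; simp [hm]
      rw [List.foldl_cons, hstep]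
      have := pv_s3_aux r l1 l2 es' [PySem.List.pyGetD e 1 0]
      rw [← hf] at this
      rw [this]
      simp [hm]
    · have hstep : f [[r], l1, l2] e = [[r], l1, l2] := by
        simp only [hf]; simp [hm]
      rw [List.foldl_cons, hstep, ih]
      simp [hm]

theorem pv_set_contains (l : List Int) (x : Int) :
    (PySem.Set.ofList l).contains x = decide (x ∈ l) := by
  simp [PySem.Set.contains, PySem.Set.mem_ofList]

-- per-value equality: A's stage-2 then stage-3 value folds compute B's per-root path
theorem pv_val (r : Int) (l1 : List Int) (s2 s3 : List (List Int)) :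
    s3.foldl (fun v e =>
        if ¬ v.length = 2 ∧ PySem.List.pyGetD e 0 0 ∈ v.getD 2 [] then
          (if v.length == 3 then v ++ [[PySem.List.pyGetD e 1 0]]
           else v.set 3 (v.getD 3 [] ++ [PySem.List.pyGetD e 1 0]))
        else v)
      (s2.foldl (fun v e =>
        if PySem.List.pyGetD e 0 0 ∈ v.getD 1 [] then
          (if v.length == 2 then v ++ [[PySem.List.pyGetD e 1 0]]
           else v.set 2 (v.getD 2 [] ++ [PySem.List.pyGetD e 1 0]))
        else v) [[r], l1])
    = (let l2 := s2.filterMap (fun e =>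
          if (PySem.Set.ofList l1).contains (PySem.List.pyGetD e 0 0) then some (PySem.List.pyGetD e 1 0) else none)
       if l2 = [] then [[r], l1]
       else
        let l3 := s3.filterMap (fun e =>
          if (PySem.Set.ofList l2).contains (PySem.List.pyGetD e 0 0) then some (PySem.List.pyGetD e 1 0) else none)
        if l3 = [] then [[r], l1, l2] else [[r], l1, l2, l3]) := by
  have hfm : ∀ (l : List Int) (es : List (List Int)),
      es.filterMap (fun e =>
        if (PySem.Set.ofList l).contains (PySem.List.pyGetD e 0 0) then some (PySem.List.pyGetD e 1 0) else none)
      = es.filterMap (fun e =>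
        if PySem.List.pyGetD e 0 0 ∈ l then some (PySem.List.pyGetD e 1 0) else none) := by
    intro l es
    apply List.filterMap_congr
    intro e _
    rw [pv_set_contains]
    by_cases h : PySem.List.pyGetD e 0 0 ∈ l <;> simp [h]
  rw [pv_s2]
  simp only [hfm]
  by_cases h2 : (s2.filterMap (fun e =>
      if PySem.List.pyGetD e 0 0 ∈ l1 then some (PySem.List.pyGetD e 1 0) else none)) = []
  · rw [if_pos h2, if_pos h2, pv_s3_len2]
  · rw [if_neg h2, if_neg h2, pv_s3]

theorem pv_main_gen (s1 s2 s3 : List (List Int)) :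
    (s3.foldl (fun paths e =>
      paths.keys.foldl (fun paths item =>
        let v := paths.getD item []
        if v.length == 2 then paths
        else if PySem.List.pyGetD e 0 0 ∈ v.getD 2 [] then
          if v.length == 3 then paths.insert item (v ++ [[PySem.List.pyGetD e 1 0]])
          else paths.insert item (v.set 3 (v.getD 3 [] ++ [PySem.List.pyGetD e 1 0]))
        else paths) paths)
      (s2.foldl (fun paths e =>
        paths.keys.foldl (fun paths item =>
          let v := paths.getD item []
          if PySem.List.pyGetD e 0 0 ∈ v.getD 1 [] then
            if v.length == 2 then paths.insert item (v ++ [[PySem.List.pyGetD e 1 0]])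
            else paths.insert item (v.set 2 (v.getD 2 [] ++ [PySem.List.pyGetD e 1 0]))
          else paths) paths)
        (s1.foldl (fun paths e =>
          let k := PySem.Int.toStr (PySem.List.pyGetD e 0 0)
          match paths.get? k with
          | none => paths.insert k [[PySem.List.pyGetD e 0 0], [PySem.List.pyGetD e 1 0]]
          | some v => paths.insert k (v.set 1 (v.getD 1 [] ++ [PySem.List.pyGetD e 1 0])))
          PySem.Dict.empty))).items
  = ((s1.foldl (fun (d : PySem.Dict String (Int × List Int)) (e : List Int) =>
        let k := PySem.Int.toStr (PySem.List.pyGetD e 0 0)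
        d.insert k (match d.get? k with
          | some rl => (rl.1, rl.2 ++ [PySem.List.pyGetD e 1 0])
          | none => (PySem.List.pyGetD e 0 0, [PySem.List.pyGetD e 1 0]))) PySem.Dict.empty).items.foldl
      (fun acc kv =>
        acc.insert kv.1 (
          let root := kv.2.1
          let l1 := kv.2.2
          let l1set := PySem.Set.ofList l1
          let l2 := s2.filterMap (fun e =>
            if l1set.contains (PySem.List.pyGetD e 0 0) then some (PySem.List.pyGetD e 1 0) else none)
          if l2 = [] then [[root], l1]
          else
            let l2set := PySem.Set.ofList l2
            let l3 := s3.filterMap (fun e =>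
              if l2set.contains (PySem.List.pyGetD e 0 0) then some (PySem.List.pyGetD e 1 0) else none)
            if l3 = [] then [[root], l1, l2] else [[root], l1, l2, l3])) PySem.Dict.empty).items := by
  set lvl1 : PySem.Dict String (Int × List Int) :=
    s1.foldl (fun (d : PySem.Dict String (Int × List Int)) (e : List Int) =>
      let k := PySem.Int.toStr (PySem.List.pyGetD e 0 0)
      d.insert k (match d.get? k with
        | some rl => (rl.1, rl.2 ++ [PySem.List.pyGetD e 1 0])
        | none => (PySem.List.pyGetD e 0 0, [PySem.List.pyGetD e 1 0]))) PySem.Dict.empty with hlvl1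
  have hnodup : lvl1.keys.Nodup := by
    rw [hlvl1]
    exact PySem.Dict.nodup_keys_foldl_insert_key s1 _ _ _ PySem.Dict.nodup_keys_empty
  -- stage 1: A's dict is lvl1 with values repackaged
  have hd1 : s1.foldl (fun paths e =>
        let k := PySem.Int.toStr (PySem.List.pyGetD e 0 0)
        match paths.get? k with
        | none => paths.insert k [[PySem.List.pyGetD e 0 0], [PySem.List.pyGetD e 1 0]]
        | some v => paths.insert k (v.set 1 (v.getD 1 [] ++ [PySem.List.pyGetD e 1 0])))
        PySem.Dict.empty
      = PySem.Dict.mk (lvl1.items.map (fun p => (p.1, [[p.2.1], p.2.2]))) :=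
    pv_stage1 s1 PySem.Dict.empty
  have hnd1 : (PySem.Dict.mk (lvl1.items.map (fun p => (p.1, ([[p.2.1], p.2.2] : List (List Int)))))).keys.Nodup := by
    have hk : (PySem.Dict.mk (lvl1.items.map (fun p => (p.1, ([[p.2.1], p.2.2] : List (List Int)))))).keys = lvl1.keys := by
      simp [PySem.Dict.keys, List.map_map]
    rw [hk]; exact hnodup
  -- stage 2
  have hstep2 : ∀ (e : List Int) (d : PySem.Dict String (List (List Int))) (k : String),
      (fun (paths : PySem.Dict String (List (List Int))) (item : String) =>
        let v := paths.getD item []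
        if PySem.List.pyGetD e 0 0 ∈ v.getD 1 [] then
          if v.length == 2 then paths.insert item (v ++ [[PySem.List.pyGetD e 1 0]])
          else paths.insert item (v.set 2 (v.getD 2 [] ++ [PySem.List.pyGetD e 1 0]))
        else paths) d k
      = (if PySem.List.pyGetD e 0 0 ∈ (d.getD k []).getD 1 [] then
          d.insert k (if (d.getD k []).length == 2 then d.getD k [] ++ [[PySem.List.pyGetD e 1 0]]
            else (d.getD k []).set 2 ((d.getD k []).getD 2 [] ++ [PySem.List.pyGetD e 1 0]))
        else d) := by
    intro e d k
    show (if PySem.List.pyGetD e 0 0 ∈ (d.getD k []).getD 1 [] then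
        if (d.getD k []).length == 2 then d.insert k (d.getD k [] ++ [[PySem.List.pyGetD e 1 0]])
        else d.insert k ((d.getD k []).set 2 ((d.getD k []).getD 2 [] ++ [PySem.List.pyGetD e 1 0]))
      else d) = _
    by_cases hc : PySem.List.pyGetD e 0 0 ∈ (d.getD k []).getD 1 []
    · rw [if_pos hc, if_pos hc, apply_ite (d.insert k)]
    · rw [if_neg hc, if_neg hc]
  have hd2 : s2.foldl (fun paths e =>
        paths.keys.foldl (fun paths item =>
          let v := paths.getD item []
          if PySem.List.pyGetD e 0 0 ∈ v.getD 1 [] then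
            if v.length == 2 then paths.insert item (v ++ [[PySem.List.pyGetD e 1 0]])
            else paths.insert item (v.set 2 (v.getD 2 [] ++ [PySem.List.pyGetD e 1 0]))
          else paths) paths)
        (PySem.Dict.mk (lvl1.items.map (fun p => (p.1, [[p.2.1], p.2.2]))))
      = PySem.Dict.mk ((lvl1.items.map (fun p => (p.1, ([[p.2.1], p.2.2] : List (List Int))))).map
          (fun p => (p.1, s2.foldl (fun v e =>
            if PySem.List.pyGetD e 0 0 ∈ v.getD 1 [] then
              (if v.length == 2 then v ++ [[PySem.List.pyGetD e 1 0]]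
               else v.set 2 (v.getD 2 [] ++ [PySem.List.pyGetD e 1 0]))
            else v) p.2))) :=
    PySem.Dict.ext (pv_stage
      (c := fun e v => PySem.List.pyGetD e 0 0 ∈ v.getD 1 [])
      (g := fun e v => if v.length == 2 then v ++ [[PySem.List.pyGetD e 1 0]]
            else v.set 2 (v.getD 2 [] ++ [PySem.List.pyGetD e 1 0]))
      (dflt := [])
      (stepA := fun e paths item =>
        let v := paths.getD item []
        if PySem.List.pyGetD e 0 0 ∈ v.getD 1 [] then
          if v.length == 2 then paths.insert item (v ++ [[PySem.List.pyGetD e 1 0]])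
          else paths.insert item (v.set 2 (v.getD 2 [] ++ [PySem.List.pyGetD e 1 0]))
        else paths)
      hstep2 s2 _ hnd1)
  -- stage 3
  have hnd2 : (PySem.Dict.mk ((lvl1.items.map (fun p => (p.1, ([[p.2.1], p.2.2] : List (List Int))))).map
      (fun p => (p.1, s2.foldl (fun v e =>
        if PySem.List.pyGetD e 0 0 ∈ v.getD 1 [] then
          (if v.length == 2 then v ++ [[PySem.List.pyGetD e 1 0]]
           else v.set 2 (v.getD 2 [] ++ [PySem.List.pyGetD e 1 0]))
        else v) p.2)))).keys.Nodup := by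
    have hk : (PySem.Dict.mk ((lvl1.items.map (fun p => (p.1, ([[p.2.1], p.2.2] : List (List Int))))).map
        (fun p => (p.1, s2.foldl (fun v e =>
          if PySem.List.pyGetD e 0 0 ∈ v.getD 1 [] then
            (if v.length == 2 then v ++ [[PySem.List.pyGetD e 1 0]]
             else v.set 2 (v.getD 2 [] ++ [PySem.List.pyGetD e 1 0]))
          else v) p.2)))).keys = lvl1.keys := by
      simp [PySem.Dict.keys, List.map_map]
    rw [hk]; exact hnodup
  have hstep3 : ∀ (e : List Int) (d : PySem.Dict String (List (List Int))) (k : String),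
      (fun (paths : PySem.Dict String (List (List Int))) (item : String) =>
        let v := paths.getD item []
        if v.length == 2 then paths
        else if PySem.List.pyGetD e 0 0 ∈ v.getD 2 [] then
          if v.length == 3 then paths.insert item (v ++ [[PySem.List.pyGetD e 1 0]])
          else paths.insert item (v.set 3 (v.getD 3 [] ++ [PySem.List.pyGetD e 1 0]))
        else paths) d k
      = (if ¬ (d.getD k []).length = 2 ∧ PySem.List.pyGetD e 0 0 ∈ (d.getD k []).getD 2 [] then
          d.insert k (if (d.getD k []).length == 3 then d.getD k [] ++ [[PySem.List.pyGetD e 1 0]]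
            else (d.getD k []).set 3 ((d.getD k []).getD 3 [] ++ [PySem.List.pyGetD e 1 0]))
        else d) := by
    intro e d k
    show (if (d.getD k []).length == 2 then d
        else if PySem.List.pyGetD e 0 0 ∈ (d.getD k []).getD 2 [] then
          if (d.getD k []).length == 3 then d.insert k (d.getD k [] ++ [[PySem.List.pyGetD e 1 0]])
          else d.insert k ((d.getD k []).set 3 ((d.getD k []).getD 3 [] ++ [PySem.List.pyGetD e 1 0]))
        else d) = _
    by_cases h2 : (d.getD k []).length = 2
    · rw [if_pos (by simp [h2]), if_neg (by simp [h2])]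
    · rw [if_neg (by simp [h2])]
      by_cases hm : PySem.List.pyGetD e 0 0 ∈ (d.getD k []).getD 2 []
      · rw [if_pos hm, if_pos (show ¬ (d.getD k []).length = 2 ∧ PySem.List.pyGetD e 0 0 ∈ (d.getD k []).getD 2 [] from ⟨h2, hm⟩), apply_ite (d.insert k)]
      · rw [if_neg hm, if_neg (fun h => hm h.2)]
  have hd3 : (s3.foldl (fun paths e =>
        paths.keys.foldl (fun paths item =>
          let v := paths.getD item []
          if v.length == 2 then paths
          else if PySem.List.pyGetD e 0 0 ∈ v.getD 2 [] then
            if v.length == 3 then paths.insert item (v ++ [[PySem.List.pyGetD e 1 0]])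
            else paths.insert item (v.set 3 (v.getD 3 [] ++ [PySem.List.pyGetD e 1 0]))
          else paths) paths)
        (PySem.Dict.mk ((lvl1.items.map (fun p => (p.1, ([[p.2.1], p.2.2] : List (List Int))))).map
          (fun p => (p.1, s2.foldl (fun v e =>
            if PySem.List.pyGetD e 0 0 ∈ v.getD 1 [] then
              (if v.length == 2 then v ++ [[PySem.List.pyGetD e 1 0]]
               else v.set 2 (v.getD 2 [] ++ [PySem.List.pyGetD e 1 0]))
            else v) p.2))))).items
      = ((lvl1.items.map (fun p => (p.1, ([[p.2.1], p.2.2] : List (List Int))))).map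
          (fun p => (p.1, s2.foldl (fun v e =>
            if PySem.List.pyGetD e 0 0 ∈ v.getD 1 [] then
              (if v.length == 2 then v ++ [[PySem.List.pyGetD e 1 0]]
               else v.set 2 (v.getD 2 [] ++ [PySem.List.pyGetD e 1 0]))
            else v) p.2))).map
          (fun p => (p.1, s3.foldl (fun v e =>
            if ¬ v.length = 2 ∧ PySem.List.pyGetD e 0 0 ∈ v.getD 2 [] then
              (if v.length == 3 then v ++ [[PySem.List.pyGetD e 1 0]]
               else v.set 3 (v.getD 3 [] ++ [PySem.List.pyGetD e 1 0]))
            else v) p.2)) :=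
    pv_stage
      (c := fun e v => ¬ v.length = 2 ∧ PySem.List.pyGetD e 0 0 ∈ v.getD 2 [])
      (g := fun e v => if v.length == 3 then v ++ [[PySem.List.pyGetD e 1 0]]
            else v.set 3 (v.getD 3 [] ++ [PySem.List.pyGetD e 1 0]))
      (dflt := [])
      (stepA := fun e paths item =>
        let v := paths.getD item []
        if v.length == 2 then paths
        else if PySem.List.pyGetD e 0 0 ∈ v.getD 2 [] then
          if v.length == 3 then paths.insert item (v ++ [[PySem.List.pyGetD e 1 0]])
          else paths.insert item (v.set 3 (v.getD 3 [] ++ [PySem.List.pyGetD e 1 0]))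
        else paths)
      hstep3 s3 _ hnd2
  -- B's per-root fold over fresh distinct keys
  have hB : ((lvl1.items.foldl (fun acc kv =>
        acc.insert kv.1 (
          let root := kv.2.1
          let l1 := kv.2.2
          let l1set := PySem.Set.ofList l1
          let l2 := s2.filterMap (fun e =>
            if l1set.contains (PySem.List.pyGetD e 0 0) then some (PySem.List.pyGetD e 1 0) else none)
          if l2 = [] then [[root], l1]
          else
            let l2set := PySem.Set.ofList l2
            let l3 := s3.filterMap (fun e =>
              if l2set.contains (PySem.List.pyGetD e 0 0) then some (PySem.List.pyGetD e 1 0) else none)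
            if l3 = [] then [[root], l1, l2] else [[root], l1, l2, l3])) PySem.Dict.empty).items)
      = PySem.Dict.empty.items ++ lvl1.items.map (fun kv =>
          (kv.1,
            let root := kv.2.1
            let l1 := kv.2.2
            let l1set := PySem.Set.ofList l1
            let l2 := s2.filterMap (fun e =>
              if l1set.contains (PySem.List.pyGetD e 0 0) then some (PySem.List.pyGetD e 1 0) else none)
            if l2 = [] then [[root], l1]
            else
              let l2set := PySem.Set.ofList l2
              let l3 := s3.filterMap (fun e =>
                if l2set.contains (PySem.List.pyGetD e 0 0) then some (PySem.List.pyGetD e 1 0) else none)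
              if l3 = [] then [[root], l1, l2] else [[root], l1, l2, l3])) :=
    PySem.Dict.items_foldl_insert_fresh lvl1.items (fun kv => kv.1) _ PySem.Dict.empty
      (fun a _ => PySem.Dict.contains_empty (ν := List (List Int)) a.1) hnodup
  rw [hd1, hd2, hd3, hB]
  simp only [List.map_map]
  apply List.map_congr_left
  intro p _
  exact congrArg (fun x => (p.1, x)) (pv_val p.2.1 p.2.2 s2 s3)

theorem pv_main (edges : List (List (List Int))) :
    getClusterPaths edges = getClusterPaths_alt edges :=
  pv_main_gen (PySem.List.pyGetD edges 0 []) (PySem.List.pyGetD edges 1 []) (PySem.List.pyGetD edges 2 [])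

-- ===== VERDICT (by name: the statement is the Claim_ definition above) =====
theorem getClusterPaths_spec : Claim_equal_getClusterPaths := by
  intro edges _ _
  unfold Spec_getClusterPaths
  exact pv_main edges
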